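-- pv_equiv track=rewrite | github.com/DavidSM64/Diddy-Kong-Racing | tools/python/fix_regional_names.py | breakDownSymbol
-- ===== SOURCE A (Python) =====
-- def breakDownSymbol(symbolName):
--     form = 'unknown'
--
--     if symbolName.islower():
--         form = 'snakeLower'
--     elif symbolName.isupper():
--         form = 'snakeUpper'
--     elif symbolName[0].islower():
--         form = 'camelCase'
--     elif symbolName[0].isupper():
--         form = 'pascalCase'
--
--     if form == 'unknown':
--         return None
--
--     parts = []
--
--     if form == 'snakeLower' or form == 'snakeUpper':
--         parts = symbolName.split('_')
--     elif form == 'camelCase' or form == 'pascalCase':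
--         start = 0
--         for i in range(1, len(symbolName)):
--             if symbolName[i].isupper():
--                 parts.append(symbolName[start:i])
--                 start = i
--         parts.append(symbolName[start:])
--
--     return parts
-- ===== SOURCE B (Python) =====
-- def breakDownSymbol(symbolName):
--     # single flag scan over the characters instead of islower()/isupper() chain,
--     # then a character-accumulating word builder instead of index slicing
--     has_cased = any(c.isalpha() for c in symbolName)
--     has_upper = any(c.isupper() for c in symbolName)
--     has_lower = any(c.islower() for c in symbolName)
--     if has_cased and (not has_upper or not has_lower):
--         return symbolName.split('_')
--     first = symbolName[0]
--     if not first.isalpha():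
--         return None
--     parts = []
--     word = first
--     for c in symbolName[1:]:
--         if c.isupper():
--             parts.append(word)
--             word = c
--         else:
--             word += c
--     parts.append(word)
--     return parts
-- ===== Notes on version B (the rewrite author's own statement) =====
-- stated objective: alternative
-- what changed: B classifies with one character-level flag scan (has_cased/has_upper/has_lower any() tests) instead of A's islower()/isupper() form-string chain, and splits camel/pascal names by accumulating each word character by character (flushing the buffer at an uppercase letter) instead of A's running-start index loop over slices.
import Mathlib
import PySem

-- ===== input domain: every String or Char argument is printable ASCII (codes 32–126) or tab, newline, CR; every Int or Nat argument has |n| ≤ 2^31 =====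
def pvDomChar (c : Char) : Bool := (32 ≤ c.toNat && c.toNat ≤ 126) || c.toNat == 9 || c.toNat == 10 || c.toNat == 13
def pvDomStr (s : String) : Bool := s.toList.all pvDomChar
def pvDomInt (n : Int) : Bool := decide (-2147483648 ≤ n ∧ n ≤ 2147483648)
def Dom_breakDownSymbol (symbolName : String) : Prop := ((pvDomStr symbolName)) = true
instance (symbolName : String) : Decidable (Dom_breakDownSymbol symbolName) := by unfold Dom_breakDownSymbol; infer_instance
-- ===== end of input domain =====

-- B replaces A's form-string classifier and index-slicing loop by a single character flag
-- scan plus a character-accumulating word builder (alternative decomposition, same cost).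
-- Equivalence is about the return value; neither program mutates its argument.

-- ===== PORT A =====
-- str.islower(): at least one cased character and no uppercase one (exact on the ASCII domain,
-- where the cased characters are exactly the alphabetic ones)
def pyStrIslower (cs : List Char) : Bool :=
  cs.any PySem.Chars.isalpha && cs.all (fun c => !PySem.Chars.isupper c)

-- str.isupper(): at least one cased character and no lowercase one (exact on the ASCII domain)
def pyStrIsupper (cs : List Char) : Bool :=
  cs.any PySem.Chars.isalpha && cs.all (fun c => !PySem.Chars.islower c)

-- the body of A's for-loop, state = (start, parts)
def camelStep (cs : List Char) (acc : Int × List String) (i : Int) : Int × List String :=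
  if PySem.Chars.isupper (PySem.List.pyGetD cs i ' ') then
    (i, acc.2 ++ [String.ofList (PySem.List.slice cs (some acc.1) (some i))])
  else acc

-- A's form-classification chain (the first half of A, kept as a helper)
def classifyForm (cs : List Char) : String :=
  if pyStrIslower cs then "snakeLower"
  else if pyStrIsupper cs then "snakeUpper"
  else
    match cs.head? with
    | none => "unknown"   -- Python raises IndexError on the empty string (excluded by Pre_)
    | some c =>
      if PySem.Chars.islower c then "camelCase"
      else if PySem.Chars.isupper c then "pascalCase"
      else "unknown"

def breakDownSymbol (symbolName : String) : Option (List String) :=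
  let cs := symbolName.toList
  let form : String := classifyForm cs
  if form = "unknown" then none
  else if form = "snakeLower" ∨ form = "snakeUpper" then
    some ((PySem.Chars.splitOn cs ['_']).map String.ofList)
  else if form = "camelCase" ∨ form = "pascalCase" then
    let st := (PySem.List.pyRange 1 (cs.length : Int)).foldl (camelStep cs) (0, [])
    some (st.2 ++ [String.ofList (PySem.List.slice cs (some st.1) none)])
  else some []

-- ===== PORT B =====
-- B's for-loop: build each word character by character, flushing on an uppercase letter
def camelWords (parts : List String) (word : List Char) : List Char → List String
  | [] => parts ++ [String.ofList word]
  | c :: rest =>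
    if PySem.Chars.isupper c then camelWords (parts ++ [String.ofList word]) [c] rest
    else camelWords parts (word ++ [c]) rest

def breakDownSymbol_alt (symbolName : String) : Option (List String) :=
  let cs := symbolName.toList
  let hasCased := cs.any PySem.Chars.isalpha
  let hasUpper := cs.any PySem.Chars.isupper
  let hasLower := cs.any PySem.Chars.islower
  if hasCased && (!hasUpper || !hasLower) then
    some ((PySem.Chars.splitOn cs ['_']).map String.ofList)
  else
    match cs.head? with
    | none => none   -- Python raises IndexError on the empty string (excluded by Pre_)
    | some first =>
      if !PySem.Chars.isalpha first then none
      else some (camelWords [] [first] cs.tail)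

-- ===== PRECONDITION & SPEC =====
-- Pre_ excludes only the empty string, on which both Pythons raise IndexError at symbolName[0]
def Pre_breakDownSymbol (symbolName : String) : Prop := symbolName ≠ ""
instance (symbolName : String) : Decidable (Pre_breakDownSymbol symbolName) := by
  unfold Pre_breakDownSymbol; infer_instance

def pvWitness_breakDownSymbol : String := "abc"

def Spec_breakDownSymbol (symbolName : String) (out : Option (List String)) : Prop :=
  out = breakDownSymbol_alt symbolName
instance (symbolName : String) (out : Option (List String)) : Decidable (Spec_breakDownSymbol symbolName out) := by
  unfold Spec_breakDownSymbol; infer_instance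

-- ===== CLAIM (what is proved, stated in full; the proofs are below) =====
def Claim_equal_breakDownSymbol : Prop := ∀ (symbolName : String), Dom_breakDownSymbol symbolName → Pre_breakDownSymbol symbolName → Spec_breakDownSymbol symbolName (breakDownSymbol symbolName)

-- ===== LEMMAS AND PROOFS =====

-- A's snake/None classification condition equals B's flag-scan condition
lemma classify_eq (cs : List Char) :
    (pyStrIslower cs || pyStrIsupper cs)
      = (cs.any PySem.Chars.isalpha
          && (!(cs.any PySem.Chars.isupper) || !(cs.any PySem.Chars.islower))) := by
  unfold pyStrIslower pyStrIsupper
  rw [← List.not_any_eq_all_not, ← List.not_any_eq_all_not]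
  cases cs.any PySem.Chars.isalpha <;>
    cases cs.any PySem.Chars.isupper <;>
    cases cs.any PySem.Chars.islower <;> rfl

lemma isalpha_eq (c : Char) :
    PySem.Chars.isalpha c = (PySem.Chars.islower c || PySem.Chars.isupper c) := by
  simp [PySem.Chars.isalpha, PySem.Chars.islower, PySem.Chars.isupper, Bool.or_comm]

-- A's index loop with running start equals B's character-accumulating word builder
lemma camel_loop (cs : List Char) :
    ∀ (rest : List Char) (a s : Nat) (parts : List String), s ≤ a → cs.drop a = rest →
      (((PySem.List.pyRange (a : Int) (cs.length : Int)).foldl (camelStep cs)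
          ((s : Int), parts)).2
        ++ [String.ofList (PySem.List.slice cs
              (some ((PySem.List.pyRange (a : Int) (cs.length : Int)).foldl (camelStep cs)
                ((s : Int), parts)).1) none)])
      = camelWords parts (PySem.List.slice cs (some (s : Int)) (some (a : Int))) rest := by
  intro rest
  induction rest generalizing cs with
  | nil =>
    intro a s parts hsa hdrop
    have hlen : cs.length ≤ a := List.drop_eq_nil_iff.mp hdrop
    rw [PySem.List.pyRange_one_eq_nil (by exact_mod_cast hlen)]
    simp only [List.foldl_nil, camelWords]
    rw [PySem.List.slice_from_natCast, PySem.List.slice_natCast,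
        List.take_of_length_le (by simp; omega)]
  | cons c r ih =>
    intro a s parts hsa hdrop
    have hlt : a < cs.length := by
      by_contra h
      rw [List.drop_eq_nil_of_le (by omega)] at hdrop
      exact List.cons_ne_nil c r hdrop.symm
    have hget : cs[a]'hlt = c := by
      have := List.drop_eq_getElem_cons (l := cs) hlt
      rw [hdrop] at this
      exact (List.cons.injEq .. ▸ this).1.symm
    have hdrop' : cs.drop (a + 1) = r := by
      have := List.drop_eq_getElem_cons (l := cs) hlt
      rw [hdrop, hget] at this
      exact (List.cons.injEq .. ▸ this).2.symm
    rw [PySem.List.pyRange_one_cons (by exact_mod_cast hlt)]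
    simp only [List.foldl_cons]
    have hgetD : PySem.List.pyGetD cs (a : Int) ' ' = c := by
      rw [PySem.List.pyGetD_natCast]
      simp [List.getD, hget, hlt]
    by_cases hup : PySem.Chars.isupper c = true
    · simp only [camelStep, hgetD, hup, if_pos]
      have h1 : ((a : Int) + 1) = ((a + 1 : Nat) : Int) := by push_cast; ring
      rw [h1, ih cs (a + 1) a (parts ++ [String.ofList (PySem.List.slice cs (some (s : Int)) (some (a : Int)))]) (by omega) hdrop']
      have hone : PySem.List.slice cs (some (a : Int)) (some ((a + 1 : Nat) : Int)) = [c] := by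
        rw [PySem.List.slice_natCast, Nat.add_sub_cancel_left]
        rw [hdrop]
        rfl
      rw [hone]
      simp [camelWords, hup]
    · simp only [camelStep, hgetD, hup, Bool.false_eq_true, if_false]
      have h1 : ((a : Int) + 1) = ((a + 1 : Nat) : Int) := by push_cast; ring
      rw [h1, ih cs (a + 1) s parts (by omega) hdrop']
      have hstep : PySem.List.slice cs (some (s : Int)) (some ((a + 1 : Nat) : Int))
          = PySem.List.slice cs (some (s : Int)) (some (a : Int)) ++ [c] := by
        rw [PySem.List.slice_natCast, PySem.List.slice_natCast]
        have h2 : a + 1 - s = (a - s) + 1 := by omega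
        rw [h2, List.take_add_one]
        have h3 : (cs.drop s)[a - s]? = some c := by
          rw [List.getElem?_drop]
          have h4 : s + (a - s) = a := by omega
          rw [h4]
          simp [hget, hlt]
        simp [h3]
      rw [hstep]
      simp [camelWords, hup]

theorem breakDownSymbol_eq (symbolName : String) (hpre : symbolName ≠ "") :
    breakDownSymbol symbolName = breakDownSymbol_alt symbolName := by
  simp only [breakDownSymbol, breakDownSymbol_alt]
  cases hcs : symbolName.toList with
  | nil =>
    exact absurd (by ext1; simpa using congrArg id hcs) hpre
  | cons c rest =>
    have hclass := classify_eq (c :: rest)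
    have key := camel_loop (c :: rest) rest 1 0 [] (by omega) (by simp)
    rw [show ((0 : Nat) : Int) = 0 from rfl, show ((1 : Nat) : Int) = 1 from rfl] at key
    have hone : PySem.List.slice (c :: rest) (some 0) (some 1) = [c] := by
      rw [show ((0 : Int)) = ((0 : Nat) : Int) from rfl, show ((1 : Int)) = ((1 : Nat) : Int) from rfl,
          PySem.List.slice_natCast]
      rfl
    by_cases h1 : pyStrIslower (c :: rest) = true
    · have hb : ((c :: rest).any PySem.Chars.isalpha
          && (!((c :: rest).any PySem.Chars.isupper) || !((c :: rest).any PySem.Chars.islower))) = true := by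
        rw [← hclass, h1]; simp
      have hform : classifyForm (c :: rest) = "snakeLower" := by
        simp [classifyForm, h1]
      rw [hform, if_neg (by decide : ¬ ("snakeLower" : String) = "unknown"),
          if_pos (Or.inl rfl : ("snakeLower" : String) = "snakeLower" ∨ ("snakeLower" : String) = "snakeUpper"),
          if_pos hb]
    · by_cases h2 : pyStrIsupper (c :: rest) = true
      · have hb : ((c :: rest).any PySem.Chars.isalpha
            && (!((c :: rest).any PySem.Chars.isupper) || !((c :: rest).any PySem.Chars.islower))) = true := by
          rw [← hclass, h2]; simp
        have hform : classifyForm (c :: rest) = "snakeUpper" := by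
          simp [classifyForm, h1, h2]
        rw [hform, if_neg (by decide : ¬ ("snakeUpper" : String) = "unknown"),
            if_pos (Or.inr rfl : ("snakeUpper" : String) = "snakeLower" ∨ ("snakeUpper" : String) = "snakeUpper"),
            if_pos hb]
      · have hb : ((c :: rest).any PySem.Chars.isalpha
            && (!((c :: rest).any PySem.Chars.isupper) || !((c :: rest).any PySem.Chars.islower))) = false := by
          rw [← hclass, Bool.or_eq_false_iff]
          exact ⟨Bool.eq_false_iff.mpr h1, Bool.eq_false_iff.mpr h2⟩
        rw [if_neg (by rw [hb]; simp : ¬ ((c :: rest).any PySem.Chars.isalpha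
              && (!((c :: rest).any PySem.Chars.isupper) || !((c :: rest).any PySem.Chars.islower))) = true)]
        simp only [List.head?_cons, List.tail_cons]
        by_cases h3 : PySem.Chars.islower c = true
        · have ha : PySem.Chars.isalpha c = true := by rw [isalpha_eq, h3]; simp
          have hform : classifyForm (c :: rest) = "camelCase" := by
            simp [classifyForm, h1, h2, h3]
          rw [hform, if_neg (by decide : ¬ ("camelCase" : String) = "unknown"),
              if_neg (by decide : ¬ (("camelCase" : String) = "snakeLower" ∨ ("camelCase" : String) = "snakeUpper")),
              if_pos (Or.inl rfl : ("camelCase" : String) = "camelCase" ∨ ("camelCase" : String) = "pascalCase"),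
              if_neg (by rw [ha]; simp : ¬ (!PySem.Chars.isalpha c) = true)]
          rw [key, hone]
        · by_cases h4 : PySem.Chars.isupper c = true
          · have ha : PySem.Chars.isalpha c = true := by rw [isalpha_eq, h4]; simp
            have hform : classifyForm (c :: rest) = "pascalCase" := by
              simp [classifyForm, h1, h2, h3, h4]
            rw [hform, if_neg (by decide : ¬ ("pascalCase" : String) = "unknown"),
                if_neg (by decide : ¬ (("pascalCase" : String) = "snakeLower" ∨ ("pascalCase" : String) = "snakeUpper")),
                if_pos (Or.inr rfl : ("pascalCase" : String) = "camelCase" ∨ ("pascalCase" : String) = "pascalCase"),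
                if_neg (by rw [ha]; simp : ¬ (!PySem.Chars.isalpha c) = true)]
            rw [key, hone]
          · have ha : PySem.Chars.isalpha c = false := by rw [isalpha_eq]; simp [h3, h4]
            have hform : classifyForm (c :: rest) = "unknown" := by
              simp [classifyForm, h1, h2, h3, h4]
            rw [hform, if_pos (rfl : ("unknown" : String) = "unknown"),
                if_pos (by rw [ha]; simp : (!PySem.Chars.isalpha c) = true)]

-- ===== VERDICT (by name: the statement is the Claim_ definition above) =====
theorem breakDownSymbol_spec : Claim_equal_breakDownSymbol := by
  intro s _ hpre
  unfold Spec_breakDownSymbol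
  exact breakDownSymbol_eq s hpre
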